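-- pv_equiv track=rewrite | github.com/LNgo00/Python | scripts/contests/historical_score_1.py | __bonusPerPositionAndTime
-- ===== SOURCE A (Python) =====
-- def __locPercentile(n, p=0.90):
--
--     '''
--     @param n: integer for percentile location calculation from a population. total number of population
--     @param p: default= 0.90, float to select percentile population location to return
--     :return: position of percentile p under as integer following the python round convention
--     :business_rule: return number of contest participants who receives bonus score
--     '''
--     return round((1-p)*n)
--
-- def __rangeCalculation(numberOf_contest_participants, p=0.90):
--     '''
--     TODO complete definitions
--     :param loc_percentile: integer for range division, number of participants who
--     receive bonus in a contest
--     :return quantity of participants who receive third and fourth bonus range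
--     :business_rule: first and second bonus range are first 10 participants for all the contests
--
--     '''
--     range_for_percentile = __locPercentile(numberOf_contest_participants,p)
--     ## punctuation for first 10 are keep for all contests
--     range = (range_for_percentile - 10)/2
--     return round(range)
--
-- def __bonusGrid():
--
--     '''
--     @return: dictionary = {key1: {key2: bonusValue}}
--                         key1: string "rangen"
--                         key2: times the participant enter the top 90% in previous contests (0-n)
--                         bonusValue: bonus for that contest posicion and top 90% times.
--     '''
--     score_level1 = [score for score in range(20, 100 + 1, 20)]
--     score_level2 = [score for score in range(15, 100, 15)] #max number will be 90
--     score_level3 = [score for score in range(10, 100 + 1, 10)]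
--     score_level4 = [score for score in range(5, 100 + 1, 5)]
--
--     score_list = [score_level1, score_level2, score_level3, score_level4]
--
--     bonus_grid = {}
--     bonus_grid["range1"]={}
--     for n in range(5):
--         bonus_grid["range1"][n]= score_list[0][n]
--
--     bonus_grid["range2"]={}
--     for n in range(6):
--         bonus_grid["range2"][n] = score_list[1][n]
--
--     bonus_grid["range3"]={}
--     for n in range(10):
--         bonus_grid["range3"][n] = score_list[2][n]
--
--     bonus_grid["range4"]={}
--     for n in range(20):
--         bonus_grid["range4"][n] = score_list[3][n]
--
--     return bonus_grid
--
-- def __bonusPerPositionAndTime(numberOf_contest_participants):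
--     '''
--     @return: dictionary = {key1: {key2: bonusValue}}
--                         key1: participant position (ranking) in a contest
--                         key2: times the participant enter the top 90% in previous contests (0-n)
--                         bonusValue: bonus for that contest position and top 90% times.
--
--     '''
--     positions = [ n for n in range(1, __locPercentile(numberOf_contest_participants) + 1)]
--     bonus_per_position_and_time = {}
--     bonus_grid = __bonusGrid()
--
--     for position in positions:
--
--         if  (1 <= position <= 5):
--             bonus_per_position_and_time[position] = bonus_grid["range1"]
--
--         if (6 <= position <= 10):
--             bonus_per_position_and_time[position] = bonus_grid["range2"]
--
--         if (11 <= position <= (11 + __rangeCalculation(numberOf_contest_participants)) + 1):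
--             bonus_per_position_and_time[position] = bonus_grid["range3"]
--
--         if (11 + __rangeCalculation(numberOf_contest_participants) + 1 <= position\
--              <= __locPercentile(numberOf_contest_participants) + 1):
--             bonus_per_position_and_time[position] = bonus_grid["range4"]
--
--     return bonus_per_position_and_time
-- ===== SOURCE B (Python) =====
-- def __locPercentile(n, p=0.90):
--     return round((1-p)*n)
--
-- def __rangeCalculation(numberOf_contest_participants, p=0.90):
--     range_for_percentile = __locPercentile(numberOf_contest_participants, p)
--     return round((range_for_percentile - 10)/2)
--
-- def __bonusGrid():
--     score_level1 = [score for score in range(20, 100 + 1, 20)]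
--     score_level2 = [score for score in range(15, 100, 15)]
--     score_level3 = [score for score in range(10, 100 + 1, 10)]
--     score_level4 = [score for score in range(5, 100 + 1, 5)]
--     score_list = [score_level1, score_level2, score_level3, score_level4]
--     bonus_grid = {}
--     bonus_grid["range1"] = {}
--     for n in range(5):
--         bonus_grid["range1"][n] = score_list[0][n]
--     bonus_grid["range2"] = {}
--     for n in range(6):
--         bonus_grid["range2"][n] = score_list[1][n]
--     bonus_grid["range3"] = {}
--     for n in range(10):
--         bonus_grid["range3"][n] = score_list[2][n]
--     bonus_grid["range4"] = {}
--     for n in range(20):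
--         bonus_grid["range4"][n] = score_list[3][n]
--     return bonus_grid
--
-- def __bonusPerPositionAndTime(numberOf_contest_participants):
--     # Closed-form band counts: a flat band-name list built by list replication
--     # (no per-position tests at all), then one zip of positions with bands.
--     L = __locPercentile(numberOf_contest_participants)
--     rc = __rangeCalculation(numberOf_contest_participants)
--     grid = __bonusGrid()
--     bands = (["range1"] * max(0, min(5, L))
--              + ["range2"] * max(0, min(10, L) - 5)
--              + ["range3"] * max(0, min(11 + rc, L) - 10)
--              + ["range4"] * max(0, L + 1 - max(11, 12 + rc)))
--     return {p: grid[b] for p, b in enumerate(bands, start=1)}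
-- ===== Notes on version B (the rewrite author's own statement) =====
-- stated objective: alternative
-- what changed: B computes the four band sizes in closed form (clamped arithmetic on the percentile cutoff and the range size, both computed once), materialises the band-name sequence by list replication instead of any per-position testing, and builds the dict in one zip/enumerate comprehension; A scans every position re-evaluating four overlapping if-conditions that recompute the range size each iteration.
import Mathlib
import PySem

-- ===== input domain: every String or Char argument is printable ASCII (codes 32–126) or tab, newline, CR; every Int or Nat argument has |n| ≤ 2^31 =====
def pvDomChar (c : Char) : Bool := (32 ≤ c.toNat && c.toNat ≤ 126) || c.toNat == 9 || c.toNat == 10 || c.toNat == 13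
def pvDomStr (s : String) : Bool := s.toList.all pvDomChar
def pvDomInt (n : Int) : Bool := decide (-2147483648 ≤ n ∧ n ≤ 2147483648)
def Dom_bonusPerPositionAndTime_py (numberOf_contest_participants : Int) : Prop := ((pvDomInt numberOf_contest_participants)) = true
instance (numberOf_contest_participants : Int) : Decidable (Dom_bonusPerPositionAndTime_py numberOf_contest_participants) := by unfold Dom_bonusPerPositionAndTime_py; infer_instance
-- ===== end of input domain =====

-- B replaces A's per-position four-test scan by closed-form band counts, a band list built
-- by replication, and one zip over positions (objective: alternative).

-- ===== PORT A =====

-- round-half-to-even of m / d (m, d : Nat, d a power of two in our uses); this is both the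
-- IEEE-754 significand rounding step and Python's round() tie rule.
def pvRoundHalfEvenDiv (m d : Nat) : Nat :=
  let q := m / d
  let r := m % d
  if 2 * r > d ∨ (2 * r = d ∧ q % 2 = 1) then q + 1 else q

-- __locPercentile(n, p=0.90) = round((1-0.90)*n).  (1-0.90) is the IEEE double
-- 900719925474099/2^53; the port emulates the double multiplication (exact integer product
-- rounded to a 53-bit significand, ties to even) and Python's round() (ties to even) with
-- exact integer arithmetic; int(n) -> float is exact for |n| ≤ 2^31, and both float and
-- round are sign-symmetric, so negatives go through the absolute value.  Exact on Dom.
def pvLocPercentile (n : Int) : Int :=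
  let s := n.natAbs
  let m := 900719925474099 * s                      -- exact product, value m / 2^53
  let e := PySem.Int.bitLength (m : Int) - 53       -- excess bits beyond a 53-bit significand
  let q := pvRoundHalfEvenDiv m (2 ^ e)             -- round the product to the nearest double
  let res := pvRoundHalfEvenDiv (q * 2 ^ e) (2 ^ 53)  -- Python round() of that double
  if n < 0 then -(res : Int) else (res : Int)

-- round(k / 2) for an int k: (k - with |k| far below 2^52 - converts and divides exactly in
-- double, so round() is exactly round-half-to-even of the half-integer k/2.
def pvHalfRound (k : Int) : Int :=
  if PySem.Int.mod k 2 = 0 then PySem.Int.floordiv k 2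
  else if PySem.Int.mod (PySem.Int.floordiv k 2) 2 = 0 then PySem.Int.floordiv k 2
  else PySem.Int.floordiv k 2 + 1

-- __rangeCalculation(n, p=0.90): (range_for_percentile - 10)/2 is exact in double arithmetic
def pvRangeCalculation (n : Int) : Int :=
  pvHalfRound (pvLocPercentile n - 10)

-- __bonusGrid(); the mutated inner dicts bonus_grid["rangeK"][n] = ... become folds building
-- the inner dict; score_list[k][n] is PySem.List.pyGetD (index always in range here).
def pvBonusGrid : PySem.Dict String (PySem.Dict Int Int) :=
  let scoreLevel1 := PySem.List.pyRange 20 (100 + 1) 20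
  let scoreLevel2 := PySem.List.pyRange 15 100 15
  let scoreLevel3 := PySem.List.pyRange 10 (100 + 1) 10
  let scoreLevel4 := PySem.List.pyRange 5 (100 + 1) 5
  let scoreList := [scoreLevel1, scoreLevel2, scoreLevel3, scoreLevel4]
  let g : PySem.Dict String (PySem.Dict Int Int) := PySem.Dict.empty
  let g := g.insert "range1" ((PySem.List.pyRange 0 5 1).foldl
    (fun d n => d.insert n (PySem.List.pyGetD (PySem.List.pyGetD scoreList 0 []) n 0)) PySem.Dict.empty)
  let g := g.insert "range2" ((PySem.List.pyRange 0 6 1).foldl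
    (fun d n => d.insert n (PySem.List.pyGetD (PySem.List.pyGetD scoreList 1 []) n 0)) PySem.Dict.empty)
  let g := g.insert "range3" ((PySem.List.pyRange 0 10 1).foldl
    (fun d n => d.insert n (PySem.List.pyGetD (PySem.List.pyGetD scoreList 2 []) n 0)) PySem.Dict.empty)
  let g := g.insert "range4" ((PySem.List.pyRange 0 20 1).foldl
    (fun d n => d.insert n (PySem.List.pyGetD (PySem.List.pyGetD scoreList 3 []) n 0)) PySem.Dict.empty)
  g

-- the body of A's for-loop: four independent if-tests, a later assignment overwriting an
-- earlier one (v1..v4 are bonus_grid["range1".."range4"], as assoc lists per the convention)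
def pvBodyA (L rc : Int) (v1 v2 v3 v4 : List (Int × Int))
    (d : PySem.Dict Int (List (Int × Int))) (p : Int) : PySem.Dict Int (List (Int × Int)) :=
  let d := if 1 ≤ p ∧ p ≤ 5 then d.insert p v1 else d
  let d := if 6 ≤ p ∧ p ≤ 10 then d.insert p v2 else d
  let d := if 11 ≤ p ∧ p ≤ (11 + rc) + 1 then d.insert p v3 else d
  let d := if 11 + rc + 1 ≤ p ∧ p ≤ L + 1 then d.insert p v4 else d
  d

def bonusPerPositionAndTime_py (numberOf_contest_participants : Int) : List (Int × List (Int × Int)) :=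
  let positions := PySem.List.pyRange 1 (pvLocPercentile numberOf_contest_participants + 1) 1
  let bonus_grid := pvBonusGrid
  (positions.foldl
    (pvBodyA (pvLocPercentile numberOf_contest_participants)
      (pvRangeCalculation numberOf_contest_participants)
      ((bonus_grid.getD "range1" PySem.Dict.empty).items)
      ((bonus_grid.getD "range2" PySem.Dict.empty).items)
      ((bonus_grid.getD "range3" PySem.Dict.empty).items)
      ((bonus_grid.getD "range4" PySem.Dict.empty).items))
    PySem.Dict.empty).items

-- ===== PORT B =====

-- Python's enumerate(xs, start=k): pair each element with its 1-based position
def pvEnumFrom {α : Type} (k : Int) : List α → List (Int × α)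
  | [] => []
  | x :: xs => (k, x) :: pvEnumFrom (k + 1) xs

def bonusPerPositionAndTime_py_alt (numberOf_contest_participants : Int) : List (Int × List (Int × Int)) :=
  let L := pvLocPercentile numberOf_contest_participants
  let rc := pvRangeCalculation numberOf_contest_participants
  let grid := pvBonusGrid
  let bands : List String :=
    List.replicate (max 0 (min 5 L)).toNat "range1"
    ++ List.replicate (max 0 (min 10 L - 5)).toNat "range2"
    ++ List.replicate (max 0 (min (11 + rc) L - 10)).toNat "range3"
    ++ List.replicate (max 0 (L + 1 - max 11 (12 + rc))).toNat "range4"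
  -- {p: grid[b] for p, b in enumerate(bands, start=1)}
  ((pvEnumFrom 1 bands).foldl
    (fun d pb => d.insert pb.1 ((grid.getD pb.2 PySem.Dict.empty).items))
    (PySem.Dict.empty : PySem.Dict Int (List (Int × Int)))).items

-- ===== PRECONDITION & SPEC =====
def Spec_bonusPerPositionAndTime_py (numberOf_contest_participants : Int) (out : List (Int × List (Int × Int))) : Prop := out = bonusPerPositionAndTime_py_alt numberOf_contest_participants
instance (numberOf_contest_participants : Int) (out : List (Int × List (Int × Int))) : Decidable (Spec_bonusPerPositionAndTime_py numberOf_contest_participants out) := by unfold Spec_bonusPerPositionAndTime_py; infer_instance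

-- ===== CLAIM (what is proved, stated in full; the proofs are below) =====
def Claim_equal_bonusPerPositionAndTime_py : Prop := ∀ (numberOf_contest_participants : Int), Dom_bonusPerPositionAndTime_py numberOf_contest_participants → Spec_bonusPerPositionAndTime_py numberOf_contest_participants (bonusPerPositionAndTime_py numberOf_contest_participants)

-- ===== LEMMAS AND PROOFS =====

-- the final value A's loop leaves at position p (the last firing if wins)
def pvVal (L rc : Int) (v1 v2 v3 v4 : List (Int × Int)) (p : Int) : List (Int × Int) :=
  if 11 + rc + 1 ≤ p ∧ p ≤ L + 1 then v4
  else if 11 ≤ p ∧ p ≤ (11 + rc) + 1 then v3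
  else if 6 ≤ p ∧ p ≤ 10 then v2
  else v1

-- round(k/2) is at least (k-1)/2
theorem pvHalfRound_lower (k : Int) : k - 1 ≤ 2 * pvHalfRound k := by
  have h := PySem.Int.floordiv_mul_add_mod k 2
  have h0 : 0 ≤ PySem.Int.mod k 2 := PySem.Int.mod_nonneg k (by norm_num)
  have h1 : PySem.Int.mod k 2 < 2 := PySem.Int.mod_lt k (by norm_num)
  unfold pvHalfRound
  split_ifs <;> omega

theorem pvRC_lower (n : Int) :
    pvLocPercentile n - 11 ≤ 2 * pvRangeCalculation n := by
  have := pvHalfRound_lower (pvLocPercentile n - 10)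
  unfold pvRangeCalculation
  omega

-- within the positions list, A's loop body is a single insert of the winning value
theorem pvBodyA_eq (L rc : Int) (v1 v2 v3 v4 : List (Int × Int))
    (d : PySem.Dict Int (List (Int × Int))) (p : Int) (h1 : 1 ≤ p) (h2 : p ≤ L) :
    pvBodyA L rc v1 v2 v3 v4 d p = d.insert p (pvVal L rc v1 v2 v3 v4 p) := by
  simp only [pvBodyA, pvVal]
  split_ifs <;>
    first
      | rfl
      | (apply PySem.Dict.insert_insert_self)
      | (exfalso; omega)

-- A's items list: one pair (p, winning value) per position
theorem pvA_items (L rc : Int) (v1 v2 v3 v4 : List (Int × Int)) :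
    ((PySem.List.pyRange 1 (L + 1) 1).foldl (pvBodyA L rc v1 v2 v3 v4) PySem.Dict.empty).items
      = (PySem.List.pyRange 1 (L + 1) 1).map (fun p => (p, pvVal L rc v1 v2 v3 v4 p)) := by
  rw [PySem.List.foldl_congr_mem _ _ (fun d p => d.insert p (pvVal L rc v1 v2 v3 v4 p)) _
    (by
      intro acc x hx
      rw [PySem.List.mem_pyRange_one] at hx
      exact pvBodyA_eq L rc v1 v2 v3 v4 acc x hx.1 (by omega))]
  have := PySem.Dict.items_foldl_insert_fresh (PySem.List.pyRange 1 (L + 1) 1)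
    (fun p => p) (fun p => pvVal L rc v1 v2 v3 v4 p) PySem.Dict.empty
    (by intro x _; simp) (by simpa using PySem.List.nodup_pyRange_one 1 (L + 1))
  simpa using this

-- enumerate distributes over append
theorem pvEnumFrom_append {α : Type} (k : Int) (l1 l2 : List α) :
    pvEnumFrom k (l1 ++ l2) = pvEnumFrom k l1 ++ pvEnumFrom (k + l1.length) l2 := by
  induction l1 generalizing k with
  | nil => simp [pvEnumFrom]
  | cons x xs ih =>
    simp only [List.cons_append, pvEnumFrom, ih, List.length_cons]
    congr 3
    push_cast
    ring

-- enumerate of a replicated value is a constant-valued range map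
theorem pvEnumFrom_replicate {α : Type} (c : Nat) (k : Int) (v : α) :
    pvEnumFrom k (List.replicate c v)
      = (PySem.List.pyRange k (k + c) 1).map (fun p => (p, v)) := by
  induction c generalizing k with
  | zero =>
    rw [PySem.List.pyRange_one_eq_nil (a := k) (b := k + (0:Nat)) (by omega)]
    simp [pvEnumFrom]
  | succ m ih =>
    rw [List.replicate_succ]
    simp only [pvEnumFrom]
    rw [ih (k + 1),
      PySem.List.pyRange_one_cons (a := k) (b := k + (m + 1 : Nat)) (by push_cast; omega)]
    simp only [List.map_cons]
    congr 2
    push_cast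
    ring_nf

-- the first components of an enumeration form the corresponding range
theorem pvEnumFrom_map_fst {α : Type} (l : List α) (k : Int) :
    (pvEnumFrom k l).map Prod.fst = PySem.List.pyRange k (k + l.length) 1 := by
  induction l generalizing k with
  | nil =>
    rw [PySem.List.pyRange_one_eq_nil (a := k) (b := k + ([] : List α).length) (by simp)]
    simp [pvEnumFrom]
  | cons x xs ih =>
    simp only [pvEnumFrom, List.map_cons, ih, List.length_cons]
    rw [PySem.List.pyRange_one_cons (a := k) (b := k + ((xs.length : Nat) + 1 : Nat))
      (by push_cast; omega)]
    congr 1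
    push_cast
    ring_nf

-- B's dict is built over fresh distinct keys, so its items are the enumerated pairs
theorem pvB_items (grid : PySem.Dict String (PySem.Dict Int Int)) (bands : List String) :
    ((pvEnumFrom 1 bands).foldl
      (fun d pb => d.insert pb.1 ((grid.getD pb.2 PySem.Dict.empty).items))
      (PySem.Dict.empty : PySem.Dict Int (List (Int × Int)))).items
    = (pvEnumFrom 1 bands).map
        (fun pb => (pb.1, (grid.getD pb.2 PySem.Dict.empty).items)) := by
  have := PySem.Dict.items_foldl_insert_fresh (pvEnumFrom 1 bands)
    (fun pb => pb.1) (fun pb => (grid.getD pb.2 PySem.Dict.empty).items)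
    (PySem.Dict.empty : PySem.Dict Int (List (Int × Int)))
    (by intro x _; simp)
    (by rw [pvEnumFrom_map_fst]; exact PySem.List.nodup_pyRange_one _ _)
  simpa using this

-- the four-block split of A's position map (case analysis on where L and rc fall), stated
-- directly against B's replication counts
theorem pvMapVal_const (L rc : Int) (v1 v2 v3 v4 : List (Int × Int)) (a b : Int)
    (v : List (Int × Int)) (h : ∀ p, a ≤ p → p < b → pvVal L rc v1 v2 v3 v4 p = v) :
    (PySem.List.pyRange a b 1).map (fun p => (p, pvVal L rc v1 v2 v3 v4 p))
      = (PySem.List.pyRange a b 1).map (fun p => (p, v)) := by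
  apply List.map_congr_left
  intro p hp
  rw [PySem.List.mem_pyRange_one] at hp
  rw [h p hp.1 hp.2]

theorem pvSplit (L rc : Int) (v1 v2 v3 v4 : List (Int × Int)) (hrc : L - 11 ≤ 2 * rc) :
    (PySem.List.pyRange 1 (L + 1) 1).map (fun p => (p, pvVal L rc v1 v2 v3 v4 p))
      = ((PySem.List.pyRange 1 (1 + ((max 0 (min 5 L)).toNat : Int)) 1).map (fun p => (p, v1))
        ++ (PySem.List.pyRange (1 + ((max 0 (min 5 L)).toNat : Int))
              (1 + ((max 0 (min 5 L)).toNat : Int) + ((max 0 (min 10 L - 5)).toNat : Int)) 1).map (fun p => (p, v2))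
        ++ (PySem.List.pyRange (1 + ((max 0 (min 5 L)).toNat : Int) + ((max 0 (min 10 L - 5)).toNat : Int))
              (1 + ((max 0 (min 5 L)).toNat : Int) + ((max 0 (min 10 L - 5)).toNat : Int)
                 + ((max 0 (min (11 + rc) L - 10)).toNat : Int)) 1).map (fun p => (p, v3))
        ++ (PySem.List.pyRange (1 + ((max 0 (min 5 L)).toNat : Int) + ((max 0 (min 10 L - 5)).toNat : Int)
                 + ((max 0 (min (11 + rc) L - 10)).toNat : Int))
              (1 + ((max 0 (min 5 L)).toNat : Int) + ((max 0 (min 10 L - 5)).toNat : Int)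
                 + ((max 0 (min (11 + rc) L - 10)).toNat : Int)
                 + ((max 0 (L + 1 - max 11 (12 + rc))).toNat : Int)) 1).map (fun p => (p, v4))) := by
  rw [Int.toNat_of_nonneg (le_max_left 0 (min 5 L)),
    Int.toNat_of_nonneg (le_max_left 0 (min 10 L - 5)),
    Int.toNat_of_nonneg (le_max_left 0 (min (11 + rc) L - 10)),
    Int.toNat_of_nonneg (le_max_left 0 (L + 1 - max 11 (12 + rc)))]
  by_cases hL0 : L ≤ 0
  · rw [PySem.List.pyRange_one_eq_nil (a := (1:Int)) (b := L + 1) (by omega),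
      show (1:Int) + max 0 (min 5 L) = 1 from by omega,
      show (1:Int) + max 0 (min 10 L - 5) = 1 from by omega,
      show (1:Int) + max 0 (min (11 + rc) L - 10) = 1 from by omega,
      show (1:Int) + max 0 (L + 1 - max 11 (12 + rc)) = 1 from by omega,
      PySem.List.pyRange_one_eq_nil (a := (1:Int)) (b := 1) (by omega)]
    simp
  · by_cases h5 : L ≤ 5
    · rw [show (1:Int) + max 0 (min 5 L) = L + 1 from by omega]
      rw [show L + (1:Int) + max 0 (min 10 L - 5) = L + 1 from by omega,
        show L + (1:Int) + max 0 (min (11 + rc) L - 10) = L + 1 from by omega,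
        show L + (1:Int) + max 0 (L + 1 - max 11 (12 + rc)) = L + 1 from by omega,
        PySem.List.pyRange_one_eq_nil (a := L + 1) (b := L + 1) (by omega)]
      simp only [List.map_nil, List.append_nil]
      exact pvMapVal_const L rc v1 v2 v3 v4 1 (L + 1) v1
        (by intro p hp hp'; unfold pvVal; split_ifs <;> first | rfl | (exfalso; omega))
    · by_cases h10 : L ≤ 10
      · rw [show (1:Int) + max 0 (min 5 L) = 6 from by omega,
          show (6:Int) + max 0 (min 10 L - 5) = L + 1 from by omega,
          show L + (1:Int) + max 0 (min (11 + rc) L - 10) = L + 1 from by omega,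
          show L + (1:Int) + max 0 (L + 1 - max 11 (12 + rc)) = L + 1 from by omega,
          PySem.List.pyRange_one_eq_nil (a := L + 1) (b := L + 1) (by omega),
          PySem.List.pyRange_one_append 1 6 (L + 1) (by omega) (by omega)]
        simp only [List.map_nil, List.append_nil, List.map_append]
        rw [pvMapVal_const L rc v1 v2 v3 v4 1 6 v1
            (by intro p hp hp'; unfold pvVal; split_ifs <;> first | rfl | (exfalso; omega)),
          pvMapVal_const L rc v1 v2 v3 v4 6 (L + 1) v2
            (by intro p hp hp'; unfold pvVal; split_ifs <;> first | rfl | (exfalso; omega))]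
      · -- L ≥ 11
        rw [show (1:Int) + max 0 (min 5 L) = 6 from by omega,
          show (6:Int) + max 0 (min 10 L - 5) = 11 from by omega]
        by_cases hneg : rc ≤ -1
        · -- third block empty, fourth covers 11..L
          rw [show (11:Int) + max 0 (min (11 + rc) L - 10) = 11 from by omega,
            show (11:Int) + max 0 (L + 1 - max 11 (12 + rc)) = L + 1 from by omega,
            PySem.List.pyRange_one_eq_nil (a := (11:Int)) (b := 11) (by omega),
            PySem.List.pyRange_one_append 1 6 (L + 1) (by omega) (by omega),
            PySem.List.pyRange_one_append 6 11 (L + 1) (by omega) (by omega)]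
          simp only [List.map_nil, List.append_nil, List.map_append]
          rw [pvMapVal_const L rc v1 v2 v3 v4 1 6 v1
              (by intro p hp hp'; unfold pvVal; split_ifs <;> first | rfl | (exfalso; omega)),
            pvMapVal_const L rc v1 v2 v3 v4 6 11 v2
              (by intro p hp hp'; unfold pvVal; split_ifs <;> first | rfl | (exfalso; omega)),
            pvMapVal_const L rc v1 v2 v3 v4 11 (L + 1) v4
              (by intro p hp hp'; unfold pvVal; split_ifs <;> first | rfl | (exfalso; omega))]
          simp
        · by_cases hin : 11 + rc ≤ L
          · -- third block 11..11+rc, fourth 12+rc..L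
            rw [show (11:Int) + max 0 (min (11 + rc) L - 10) = 12 + rc from by omega,
              show (12:Int) + rc + max 0 (L + 1 - max 11 (12 + rc)) = L + 1 from by omega,
              PySem.List.pyRange_one_append 1 6 (L + 1) (by omega) (by omega),
              PySem.List.pyRange_one_append 6 11 (L + 1) (by omega) (by omega),
              PySem.List.pyRange_one_append 11 (12 + rc) (L + 1) (by omega) (by omega)]
            simp only [List.map_append]
            rw [pvMapVal_const L rc v1 v2 v3 v4 1 6 v1
                (by intro p hp hp'; unfold pvVal; split_ifs <;> first | rfl | (exfalso; omega)),
              pvMapVal_const L rc v1 v2 v3 v4 6 11 v2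
                (by intro p hp hp'; unfold pvVal; split_ifs <;> first | rfl | (exfalso; omega)),
              pvMapVal_const L rc v1 v2 v3 v4 11 (12 + rc) v3
                (by intro p hp hp'; unfold pvVal; split_ifs <;> first | rfl | (exfalso; omega)),
              pvMapVal_const L rc v1 v2 v3 v4 (12 + rc) (L + 1) v4
                (by intro p hp hp'; unfold pvVal; split_ifs <;> first | rfl | (exfalso; omega))]
            simp
          · -- third block reaches L, fourth empty
            rw [show (11:Int) + max 0 (min (11 + rc) L - 10) = L + 1 from by omega,
              show L + (1:Int) + max 0 (L + 1 - max 11 (12 + rc)) = L + 1 from by omega,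
              PySem.List.pyRange_one_eq_nil (a := L + 1) (b := L + 1) (by omega),
              PySem.List.pyRange_one_append 1 6 (L + 1) (by omega) (by omega),
              PySem.List.pyRange_one_append 6 11 (L + 1) (by omega) (by omega)]
            simp only [List.map_nil, List.append_nil, List.map_append]
            rw [pvMapVal_const L rc v1 v2 v3 v4 1 6 v1
                (by intro p hp hp'; unfold pvVal; split_ifs <;> first | rfl | (exfalso; omega)),
              pvMapVal_const L rc v1 v2 v3 v4 6 11 v2
                (by intro p hp hp'; unfold pvVal; split_ifs <;> first | rfl | (exfalso; omega)),
              pvMapVal_const L rc v1 v2 v3 v4 11 (L + 1) v3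
                (by intro p hp hp'; unfold pvVal; split_ifs <;> first | rfl | (exfalso; omega))]
            simp

-- ===== VERDICT (by name: the statement is the Claim_ definition above) =====
theorem bonusPerPositionAndTime_py_spec : Claim_equal_bonusPerPositionAndTime_py := by
  intro n _
  unfold Spec_bonusPerPositionAndTime_py
  show bonusPerPositionAndTime_py n = bonusPerPositionAndTime_py_alt n
  simp only [bonusPerPositionAndTime_py, bonusPerPositionAndTime_py_alt]
  rw [pvA_items, pvB_items]
  rw [pvEnumFrom_append, pvEnumFrom_append, pvEnumFrom_append]
  simp only [List.map_append, List.length_append, List.length_replicate]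
  rw [pvEnumFrom_replicate, pvEnumFrom_replicate, pvEnumFrom_replicate, pvEnumFrom_replicate]
  simp only [List.map_map]
  rw [pvSplit _ _ _ _ _ _ (pvRC_lower n)]
  simp only [Function.comp_def]
  push_cast
  ring_nf
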